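-- pv_equiv track=rewrite | github.com/djerun/split-flap | uPython/controller/main.py | vals_to_mat
-- ===== SOURCE A (Python) =====
-- def vals_to_mat(vals, lut, w, h, default):
--     vals = vals.upper()
--     mat = [[default for a in range(h)] for b in range(w)]
--     for y in range(h):
--         for x in range(w):
--             i = x + y*w
--             if (i < len(vals)) and (vals[i] in lut):
--                 mat[x][y] = lut[vals[i]]
--     return mat
-- ===== SOURCE B (Python) =====
-- def vals_to_mat(vals, lut, w, h, default):
--     n = max(w, 0) * max(h, 0)
--     flat = [lut.get(c, default) for c in vals.upper()[:n]]
--     flat += [default] * (n - len(flat))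
--     return [flat[x::w] for x in range(w)]
-- ===== Notes on version B (the rewrite author's own statement) =====
-- stated objective: alternative
-- what changed: Instead of mutating a default grid cell by cell from a nested (y,x) loop, B builds a flat value list in one comprehension over the truncated string (padded with defaults to w*h) and then cuts each column out of it with a strided slice flat[x::w].
import Mathlib
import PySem

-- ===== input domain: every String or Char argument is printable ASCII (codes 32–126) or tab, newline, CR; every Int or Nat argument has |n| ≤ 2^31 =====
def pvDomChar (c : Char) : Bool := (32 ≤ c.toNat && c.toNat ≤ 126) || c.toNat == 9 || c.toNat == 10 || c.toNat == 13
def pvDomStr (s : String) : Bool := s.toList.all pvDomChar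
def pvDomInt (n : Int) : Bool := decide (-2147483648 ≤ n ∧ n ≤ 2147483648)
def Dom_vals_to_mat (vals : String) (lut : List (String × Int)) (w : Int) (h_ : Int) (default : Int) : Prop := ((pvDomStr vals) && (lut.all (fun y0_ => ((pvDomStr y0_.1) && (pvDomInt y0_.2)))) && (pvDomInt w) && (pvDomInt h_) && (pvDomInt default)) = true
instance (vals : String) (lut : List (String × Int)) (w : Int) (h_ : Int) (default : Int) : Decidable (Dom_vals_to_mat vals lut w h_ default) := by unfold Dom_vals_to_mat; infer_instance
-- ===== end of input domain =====

-- B replaces A's per-cell nested loop by a staged construction: one pass over the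
-- (truncated, padded) string builds a flat value list with dict.get, and each column
-- is then cut out of it with a strided slice flat[x::w].


-- ===== PORT A =====
-- mat[x][y] = v (matrix as list of columns; every use keeps both indices in range)
def pvSetCell (mat : List (List Int)) (x y : Int) (v : Int) : List (List Int) :=
  PySem.List.pySetD mat x (PySem.List.pySetD (PySem.List.pyGetD mat x []) y v)

-- body of A's inner loop: i = x + y*w; if i < len(vals) and vals[i] in lut: mat[x][y] = lut[vals[i]]
def pvStepA (cs : List Char) (lut : List (String × Int)) (w y : Int) (mat : List (List Int)) (x : Int) : List (List Int) :=
  if x + y * w < (cs.length : Int) then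
    match List.lookup (String.ofList [PySem.List.pyGetD cs (x + y * w) ' ']) lut with
    | some v => pvSetCell mat x y v
    | none => mat
  else mat

def vals_to_mat (vals : String) (lut : List (String × Int)) (w : Int) (h_ : Int) (default : Int) : List (List Int) :=
  (PySem.List.pyRange 0 h_ 1).foldl
    (fun mat y => (PySem.List.pyRange 0 w 1).foldl (pvStepA (PySem.Chars.upper vals.toList) lut w y) mat)
    ((PySem.List.pyRange 0 w 1).map (fun _ => (PySem.List.pyRange 0 h_ 1).map (fun _ => default)))

-- ===== PORT B =====
-- B: n = max(w,0)*max(h,0); flat = [lut.get(c, default) for c in vals.upper()[:n]] padded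
-- with default to length n; result = [flat[x::w] for x in range(w)]
def pvFlat0 (cs : List Char) (lut : List (String × Int)) (n : Int) (default : Int) : List Int :=
  (PySem.List.slice cs none (some n)).map
    (fun c => (List.lookup (String.ofList [c]) lut).getD default)

def pvFlat (cs : List Char) (lut : List (String × Int)) (n : Int) (default : Int) : List Int :=
  pvFlat0 cs lut n default
    ++ PySem.List.pyRepeat [default] (n - ((pvFlat0 cs lut n default).length : Int))

def vals_to_mat_alt (vals : String) (lut : List (String × Int)) (w : Int) (h_ : Int) (default : Int) : List (List Int) :=
  (PySem.List.pyRange 0 w 1).map (fun x =>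
    (PySem.List.slice? (pvFlat (PySem.Chars.upper vals.toList) lut (max w 0 * max h_ 0) default)
      (some x) none w).getD [])

-- ===== PRECONDITION & SPEC =====
def Spec_vals_to_mat (vals : String) (lut : List (String × Int)) (w : Int) (h_ : Int) (default : Int) (out : List (List Int)) : Prop := out = vals_to_mat_alt vals lut w h_ default
instance (vals : String) (lut : List (String × Int)) (w : Int) (h_ : Int) (default : Int) (out : List (List Int)) : Decidable (Spec_vals_to_mat vals lut w h_ default out) := by unfold Spec_vals_to_mat; infer_instance

-- ===== CLAIM (what is proved, stated in full; the proofs are below) =====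
def Claim_equal_vals_to_mat : Prop := ∀ (vals : String) (lut : List (String × Int)) (w : Int) (h_ : Int) (default : Int), Dom_vals_to_mat vals lut w h_ default → Spec_vals_to_mat vals lut w h_ default (vals_to_mat vals lut w h_ default)

-- ===== LEMMAS AND PROOFS =====

-- the value both programs leave in cell (x, y), as a function of i = x + y*w
def pvVal (cs : List Char) (lut : List (String × Int)) (default : Int) (i : Nat) : Int :=
  if i < cs.length then (List.lookup (String.ofList [cs.getD i ' ']) lut).getD default else default

-- the single-loop form A's nested loop flattens to (proof-side only)
def pvStepB (cs : List Char) (lut : List (String × Int)) (w : Int) (mat : List (List Int)) (i : Int) : List (List Int) :=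
  match List.lookup (String.ofList [PySem.List.pyGetD cs i ' ']) lut with
  | some v => pvSetCell mat (PySem.Int.mod i w) (PySem.Int.floordiv i w) v
  | none => mat

-- flattening the nested (y,x) loop into a single loop over i = x + y*w
theorem pv_flatten {M : Type} (w : Nat) (G : Nat → Nat → M → M) (g : Nat → M → M)
    (hG : ∀ x y, x < w → ∀ m, G x y m = g (x + y * w) m) :
    ∀ (h : Nat) (m0 : M),
      (List.range h).foldl (fun mat y => (List.range w).foldl (fun mat x => G x y mat) mat) m0
        = (List.range (w * h)).foldl (fun mat i => g i mat) m0 := by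
  intro h
  induction h with
  | zero => intro m0; simp
  | succ n ih =>
    intro m0
    rw [List.range_succ, List.foldl_append, ih, Nat.mul_succ, List.range_add,
      List.foldl_append, List.foldl_map]
    simp only [List.foldl_cons, List.foldl_nil]
    apply PySem.List.foldl_congr_mem
    intro acc x hx
    rw [hG x n (List.mem_range.mp hx) acc]
    congr 1
    ring

-- dropping the guarded identity tail: fold guarded by 'i < L' over range n = plain fold over range (min L n)
theorem pv_truncate {M : Type} (L n : Nat) (f : Nat → M → M) (m0 : M) :
    (List.range n).foldl (fun mat i => if ((i : Nat) : Int) < ((L : Nat) : Int) then f i mat else mat) m0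
      = (List.range (min L n)).foldl (fun mat i => f i mat) m0 := by
  by_cases h : n ≤ L
  · have hm : min L n = n := by omega
    rw [hm]
    apply PySem.List.foldl_congr_mem
    intro acc x hx
    rw [if_pos]
    exact_mod_cast lt_of_lt_of_le (List.mem_range.mp hx) h
  · have hm : min L n = L := by omega
    rw [hm]
    have hsplit : n = L + (n - L) := by omega
    rw [hsplit, List.range_add, List.foldl_append, List.foldl_map]
    have h2 : ∀ (S : M), (List.range (n - L)).foldl
        (fun mat k => if (((L + k : Nat)) : Int) < ((L : Nat) : Int) then f (L + k) mat else mat) S = S := by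
      intro S
      refine List.foldl_fixed' (fun k => ?_) _
      rw [if_neg]
      push_cast
      omega
    rw [h2]
    apply PySem.List.foldl_congr_mem
    intro acc x hx
    rw [if_pos]
    exact_mod_cast List.mem_range.mp hx

-- A's body at cell (x, y) is the flattened body at position i = x + y*w, guarded by i < len
theorem pvStep_eq (cs : List Char) (lut : List (String × Int)) (W : Nat) (hW : 0 < W)
    (x y : Nat) (hx : x < W) (m : List (List Int)) :
    pvStepA cs lut (W : Int) (y : Int) m (x : Int)
      = if (((x + y * W : Nat)) : Int) < ((cs.length : Nat) : Int)
          then pvStepB cs lut (W : Int) m ((x + y * W : Nat) : Int) else m := by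
  have hi : ((x : Int) + (y : Int) * (W : Int)) = ((x + y * W : Nat) : Int) := by push_cast; ring
  have e1 : PySem.Int.mod ((x + y * W : Nat) : Int) (W : Int) = (x : Int) := by
    rw [PySem.Int.mod_natCast]
    have : (x + y * W) % W = x := by rw [Nat.add_mul_mod_self_right, Nat.mod_eq_of_lt hx]
    exact_mod_cast this
  have e2 : PySem.Int.floordiv ((x + y * W : Nat) : Int) (W : Int) = (y : Int) := by
    rw [PySem.Int.floordiv_natCast]
    have : (x + y * W) / W = y := by rw [Nat.add_mul_div_right _ _ hW, Nat.div_eq_of_lt hx]; omega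
    exact_mod_cast this
  unfold pvStepA pvStepB
  rw [hi, e1, e2]


-- given x < W and y < H, the flat position x + y*W is inside the grid
theorem pv_idx_lt (W H x y : Nat) (hx : x < W) (hy : y < H) : x + y * W < W * H := by
  calc x + y * W < (y + 1) * W := by have h2 : (y + 1) * W = y * W + W := by ring
                                     omega
    _ ≤ H * W := Nat.mul_le_mul_right W hy
    _ = W * H := Nat.mul_comm H W

-- dropping the 'first n cells' guard once n = min(len, W*H)
theorem pv_drop_if (cs : List Char) (lut : List (String × Int)) (default : Int) (W H : Nat) :
    (List.range W).map (fun x => (List.range H).map (fun y =>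
        if x + y * W < min cs.length (W * H) then pvVal cs lut default (x + y * W) else default))
      = (List.range W).map (fun x => (List.range H).map (fun y => pvVal cs lut default (x + y * W))) := by
  apply List.map_congr_left
  intro x hx
  apply List.map_congr_left
  intro y hy
  have hx' := List.mem_range.mp hx
  have hy' := List.mem_range.mp hy
  have hWH := pv_idx_lt W H x y hx' hy'
  by_cases h : x + y * W < min cs.length (W * H)
  · rw [if_pos h]
  · rw [if_neg h]
    unfold pvVal
    rw [if_neg (by omega)]

theorem pv_cell_unique (W x y i : Nat) (hW : 0 < W) (hx : x < W) :
    x + y * W = i ↔ x = i % W ∧ y = i / W := by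
  constructor
  · rintro rfl
    constructor
    · rw [Nat.add_mul_mod_self_right, Nat.mod_eq_of_lt hx]
    · rw [Nat.add_mul_div_right _ _ hW, Nat.div_eq_of_lt hx]; omega
  · rintro ⟨rfl, rfl⟩
    exact Nat.mod_add_div' i W


theorem pv_fold_canon (cs : List Char) (lut : List (String × Int)) (default : Int)
    (W H : Nat) (hW : 0 < W) :
    ∀ (n : Nat), n ≤ cs.length → n ≤ W * H →
    (List.range n).foldl (fun mat i => pvStepB cs lut (W : Int) mat ((i : Nat) : Int))
        ((List.range W).map (fun _ => (List.range H).map (fun _ => default)))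
      = (List.range W).map (fun x => (List.range H).map (fun y =>
          if x + y * W < n then pvVal cs lut default (x + y * W) else default)) := by
  intro n
  induction n with
  | zero => intro _ _; simp
  | succ n ih =>
    intro hL hWH
    rw [List.range_succ, List.foldl_append, ih (by omega) (by omega), List.foldl_cons, List.foldl_nil]
    have hnL : n < cs.length := by omega
    have hyH : n / W < H := (Nat.div_lt_iff_lt_mul hW).mpr (by rw [Nat.mul_comm]; omega)
    have hgetc : PySem.List.pyGetD cs ((n : Nat) : Int) ' ' = cs.getD n ' ' := by
      rw [PySem.List.pyGetD_natCast]
    have hval : pvVal cs lut default n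
        = (List.lookup (String.ofList [cs.getD n ' ']) lut).getD default := by
      unfold pvVal; rw [if_pos hnL]
    rcases hlk : List.lookup (String.ofList [cs.getD n ' ']) lut with _ | v
    · -- no match
      unfold pvStepB
      rw [hgetc]
      simp only [hlk]
      apply List.ext_getElem (by simp)
      intro x hx1 hx2
      simp only [List.getElem_map, List.getElem_range, List.length_map, List.length_range] at hx1 hx2 ⊢
      apply List.ext_getElem (by simp)
      intro y hy1 hy2
      simp only [List.getElem_map, List.getElem_range, List.length_map, List.length_range] at hy1 hy2 ⊢
      by_cases hc : x + y * W = n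
      · rw [if_neg (by omega), if_pos (by omega), hc, hval, hlk, Option.getD_none]
      · by_cases h2 : x + y * W < n
        · rw [if_pos h2, if_pos (by omega)]
        · rw [if_neg h2, if_neg (by omega)]
    · -- match v: set cell (n % W, n / W) to v = pvVal n
      have hvv : pvVal cs lut default n = v := by rw [hval, hlk, Option.getD_some]
      unfold pvStepB
      rw [hgetc]
      simp only [hlk]
      unfold pvSetCell
      rw [PySem.Int.mod_natCast, PySem.Int.floordiv_natCast,
        PySem.List.pyGetD_natCast, PySem.List.pySetD_natCast, PySem.List.pySetD_natCast]
      have hcol : ((List.range W).map (fun x => (List.range H).map (fun y =>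
            if x + y * W < n then pvVal cs lut default (x + y * W) else default))).getD (n % W) []
          = (List.range H).map (fun y =>
            if n % W + y * W < n then pvVal cs lut default (n % W + y * W) else default) := by
        rw [List.getD_eq_getElem _ _ (by simp [Nat.mod_lt n hW])]
        simp
      rw [hcol]
      apply List.ext_getElem (by simp)
      intro x hx1 hx2
      simp only [List.length_set, List.length_map, List.length_range] at hx1 hx2
      rw [List.getElem_set]
      simp only [List.getElem_map, List.getElem_range]
      by_cases hxm : n % W = x
      · subst hxm
        rw [if_pos rfl]
        apply List.ext_getElem (by simp)
        intro y hy1 hy2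
        simp only [List.length_set, List.length_map, List.length_range] at hy1 hy2
        rw [List.getElem_set]
        simp only [List.getElem_map, List.getElem_range]
        by_cases hym : n / W = y
        · subst hym
          rw [if_pos rfl]
          have hcell : n % W + n / W * W = n := Nat.mod_add_div' n W
          rw [if_pos (by omega), hcell, hvv]
        · rw [if_neg hym]
          have hne : n % W + y * W ≠ n := fun hc =>
            hym (((pv_cell_unique W (n % W) y n hW (by omega)).mp hc).2.symm)
          by_cases h2 : n % W + y * W < n
          · rw [if_pos h2, if_pos (by omega)]
          · rw [if_neg h2, if_neg (by omega)]
      · rw [if_neg hxm]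
        apply List.ext_getElem (by simp)
        intro y hy1 hy2
        simp only [List.length_map, List.length_range] at hy1 hy2
        simp only [List.getElem_map, List.getElem_range]
        have hne : x + y * W ≠ n := fun hc =>
          hxm (((pv_cell_unique W x y n hW hx2).mp hc).1.symm)
        by_cases h2 : x + y * W < n
        · rw [if_pos h2, if_pos (by omega)]
        · rw [if_neg h2, if_neg (by omega)]

theorem pv_slice_strided {α : Type} (l : List α) (d : α) (W H x : Nat) (hW : 0 < W) (hx : x < W)
    (hl : l.length = W * H) :
    PySem.List.slice? l (some (x : Int)) none (W : Int)
      = some ((List.range H).map (fun y => l.getD (x + y * W) d)) := by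
  have hW' : (0:Int) < (W:Int) := by exact_mod_cast hW
  rw [PySem.List.slice?, if_neg (by omega)]
  simp only [PySem.List.sliceIndices, hl, if_neg (by omega : ¬ (W:Int) < 0),
    if_neg (by omega : ¬ ((x:Int) < 0)), if_pos hW']
  push_cast
  rcases Nat.eq_zero_or_pos H with hH | hH
  · subst hH
    have hm : min (x:Int) ((W:Int)*0) = 0 := by omega
    simp only [Nat.cast_zero, Int.mul_zero]
    rw [if_neg (by omega)]
    simp
  · have hxN : (x:Int) < (W:Int) * (H:Int) := by
      have : x < W * H := lt_of_lt_of_le hx (Nat.le_mul_of_pos_right W hH)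
      exact_mod_cast this
    have hmin : min (x:Int) ((W:Int)*(H:Int)) = (x:Int) := by omega
    rw [hmin, if_pos hxN]
    have hcount : (((W:Int)*(H:Int) - (x:Int) + (W:Int) - 1) / (W:Int)).toNat = H := by
      have hx' : (x:Int) < (W:Int) := by exact_mod_cast hx
      have heq : (W:Int)*(H:Int) - (x:Int) + (W:Int) - 1 = ((W:Int) - 1 - (x:Int)) + (H:Int)*(W:Int) := by ring
      have hzero : ((W:Int) - 1 - (x:Int)) / (W:Int) = 0 :=
        Int.ediv_eq_zero_of_lt (by omega) (by omega)
      rw [heq, Int.add_mul_ediv_right _ _ (by omega : (W:Int) ≠ 0), hzero]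
      omega
    rw [hcount]
    congr 1
    rw [← List.filterMap_eq_map]
    apply List.filterMap_congr
    intro k hk
    have hk' : k < H := List.mem_range.mp hk
    have hidx : ((x:Int) + (W:Int) * (k:Int)).toNat = x + k * W := by
      have h1 : (x:Int) + (W:Int) * (k:Int) = ((x + k * W : Nat) : Int) := by push_cast; ring
      rw [h1, Int.toNat_natCast]
    have hlt : x + k * W < l.length := by
      rw [hl]
      calc x + k * W < (k + 1) * W := by have h2 : (k + 1) * W = k * W + W := by ring
                                         omega
        _ ≤ H * W := Nat.mul_le_mul_right W hk'
        _ = W * H := Nat.mul_comm H W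
    rw [hidx, List.getElem?_eq_getElem hlt]
    simp only [Function.comp_apply]
    rw [List.getD_eq_getElem l d hlt]

theorem pv_flat_eq (cs : List Char) (lut : List (String × Int)) (default : Int) (N : Nat) :
    (cs.take N).map (fun c => (List.lookup (String.ofList [c]) lut).getD default)
        ++ List.replicate (N - min cs.length N) default
      = (List.range N).map (pvVal cs lut default) := by
  apply List.ext_getElem
  · simp; omega
  · intro i hi1 hi2
    simp only [List.length_append, List.length_map, List.length_take, List.length_replicate] at hi1
    simp only [List.getElem_map, List.getElem_range]
    by_cases h : i < min cs.length N
    · rw [List.getElem_append_left (by simp; omega)]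
      simp only [List.getElem_map, List.getElem_take]
      unfold pvVal
      rw [if_pos (by omega), List.getD_eq_getElem cs ' ' (by omega)]
    · rw [List.getElem_append_right (by simp; omega)]
      simp only [List.getElem_replicate]
      unfold pvVal
      rw [if_neg (by simp at hi2 ⊢; omega)]

-- the empty strided slice
theorem pv_slice_nil (x st : Int) (hx : 0 ≤ x) (hst : 0 < st) :
    PySem.List.slice? ([] : List Int) (some x) none st = some [] := by
  rw [PySem.List.slice?, if_neg (by omega)]
  have hx' : ¬ x < 0 := by omega
  simp only [PySem.List.sliceIndices, List.length_nil, Nat.cast_zero,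
    if_neg (by omega : ¬ st < 0), if_neg hx', min_eq_right hx, if_pos hst,
    if_neg (by omega : ¬ (0:Int) < 0), List.range_zero, List.filterMap_nil]

-- ===== VERDICT (by name: the statement is the Claim_ definition above) =====
theorem vals_to_mat_spec : Claim_equal_vals_to_mat := by
  intro vals lut w h_ default _
  unfold Spec_vals_to_mat vals_to_mat vals_to_mat_alt
  by_cases hw : 0 < w
  · obtain ⟨W, rfl⟩ : ∃ W : Nat, w = (W : Int) := ⟨w.toNat, (Int.toNat_of_nonneg hw.le).symm⟩
    have hW : 0 < W := by exact_mod_cast hw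
    set cs : List Char := PySem.Chars.upper vals.toList with hcs
    by_cases hh : 0 < h_
    · obtain ⟨H, rfl⟩ : ∃ H : Nat, h_ = (H : Int) := ⟨h_.toNat, (Int.toNat_of_nonneg hh.le).symm⟩
      have hH : 0 < H := by exact_mod_cast hh
      -- B's flat list is pointwise pvVal
      have hflat : pvFlat cs lut (max ((W : Int)) 0 * max ((H : Int)) 0) default
          = (List.range (W * H)).map (pvVal cs lut default) := by
        have hn : max ((W : Int)) 0 * max ((H : Int)) 0 = ((W * H : Nat) : Int) := by
          rw [max_eq_left (by positivity), max_eq_left (by positivity)]; push_cast; ring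
        unfold pvFlat pvFlat0
        rw [hn, PySem.List.slice_to cs (show (0:Int) ≤ ((W * H : Nat) : Int) from by exact_mod_cast Nat.zero_le _), Int.toNat_natCast,
          PySem.List.pyRepeat_singleton]
        have hlen0 : ((cs.take (W * H)).map
            (fun c => (List.lookup (String.ofList [c]) lut).getD default)).length
              = min (W * H) cs.length := by
          rw [List.length_map, List.length_take]
        rw [hlen0]
        have htn : (((W * H : Nat) : Int) - ((min (W * H) cs.length : Nat) : Int)).toNat
            = W * H - min cs.length (W * H) := by
          rw [Nat.min_comm]; omega
        rw [htn, pv_flat_eq cs lut default (W * H)]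
      simp only [hflat]
      -- normalise the ranges to Nat ranges on both sides
      rw [PySem.List.pyRange_zero_nat H, PySem.List.pyRange_zero_nat W]
      simp only [List.foldl_map, List.map_map, Function.comp_def]
      -- A-side: flatten, truncate, run the fold
      refine Eq.trans (pv_flatten W
          (fun x y mat => pvStepA cs lut (W : Int) (y : Int) mat (x : Int))
          (fun i mat => if ((i : Nat) : Int) < ((cs.length : Nat) : Int)
              then pvStepB cs lut (W : Int) mat ((i : Nat) : Int) else mat)
          (fun x y hx m => pvStep_eq cs lut W hW x y hx m) H _)
        (Eq.trans (pv_truncate cs.length (W * H)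
          (fun i mat => pvStepB cs lut (W : Int) mat ((i : Nat) : Int)) _) ?_)
      refine Eq.trans (pv_fold_canon cs lut default W H hW (min cs.length (W * H))
          (Nat.min_le_left _ _) (Nat.min_le_right _ _)) ?_
      refine Eq.trans (pv_drop_if cs lut default W H) ?_
      -- B-side: each column is a strided slice of the flat pvVal list
      apply List.map_congr_left
      intro x hx
      have hx' := List.mem_range.mp hx
      rw [pv_slice_strided ((List.range (W * H)).map (pvVal cs lut default)) (0 : Int)
          W H x hW hx' (by rw [List.length_map, List.length_range]), Option.getD_some]
      apply List.map_congr_left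
      intro y hy
      have hy' := List.mem_range.mp hy
      rw [PySem.List.getD_map_range _ _ _ _ (pv_idx_lt W H x y hx' hy')]
    · -- w > 0, h ≤ 0: a grid of W empty columns on both sides
      have hh' : h_ ≤ 0 := not_lt.mp hh
      have hflat : pvFlat cs lut (max ((W : Int)) 0 * max h_ 0) default = [] := by
        have hn0 : max ((W : Int)) 0 * max h_ 0 = 0 := by
          rw [max_eq_right hh', mul_zero]
        unfold pvFlat pvFlat0
        rw [hn0, PySem.List.slice_to cs (le_refl (0:Int)), Int.toNat_zero, List.take_zero, List.map_nil,
          List.nil_append, List.length_nil, Nat.cast_zero, PySem.List.pyRepeat_singleton]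
        rfl
      simp only [hflat]
      rw [PySem.List.pyRange_one_eq_nil hh', List.map_nil, List.foldl_nil]
      apply List.map_congr_left
      intro x hx
      have hx0 : (0 : Int) ≤ x := (PySem.List.mem_pyRange_one.mp hx).1
      rw [pv_slice_nil x (W : Int) hx0 (by exact_mod_cast hW), Option.getD_some]
  · -- w ≤ 0: no columns at all
    have hw' : w ≤ 0 := not_lt.mp hw
    rw [PySem.List.pyRange_one_eq_nil hw']
    simp [List.foldl_fixed]
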